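-- pv_equiv track=rewrite | github.com/tan32217/ChatDB | backend/src/queryMapper.py | find_operator
-- ===== SOURCE A (Python) =====
-- operator_mappings = {
--     '=': '=',
--     '==': '=',
--     '>': '>',
--     '<': '<',
--     '>=': '>=',
--     '<=': '<=',
--     '!=': '!=',
--     'equal to': '=',
--     'equals': '=',
--     'greater than or equal to': '>=',
--     'less than or equal to': '<=',
--     'not equal to': '!=',
--     'not equals': '!=',
--     'greater than': '>',
--     'less than': '<',
--     'fewer than': '<',
--     'more than': '>',
--     'greater': '>',
--     'exceeds': '>',
--     'less': '<',
--     'above': '>',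
--     'below': '<',
--     'is': '='
-- }
--
-- def find_operator(input_terms_list):
--     for op_length in range(5, 0, -1):
--         for index in range(len(input_terms_list) - op_length + 1):
--             potential_op = ' '.join(input_terms_list[index:index + op_length])
--             op_symbol = operator_mappings.get(potential_op)
--             if op_symbol:
--                 return op_symbol, op_length
--     return None, 0
-- ===== SOURCE B (Python) =====
-- operator_mappings = dict([
--     ('=', '='),
--     ('==', '='),
--     ('>', '>'),
--     ('<', '<'),
--     ('>=', '>='),
--     ('<=', '<='),
--     ('!=', '!='),
--     ('equal to', '='),
--     ('equals', '='),
--     ('greater than or equal to', '>='),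
--     ('less than or equal to', '<='),
--     ('not equal to', '!='),
--     ('not equals', '!='),
--     ('greater than', '>'),
--     ('less than', '<'),
--     ('fewer than', '<'),
--     ('more than', '>'),
--     ('greater', '>'),
--     ('exceeds', '>'),
--     ('less', '<'),
--     ('above', '>'),
--     ('below', '<'),
--     ('is', '='),
-- ])
--
-- def find_operator(input_terms_list):
--     # One left-to-right pass over start indices: at each index record the longest
--     # matching phrase starting there, then select the candidate with maximum
--     # length (earliest index wins ties).
--     n = len(input_terms_list)
--     candidates = []
--     for index in range(n):
--         for length in range(5, 0, -1):
--             if index + length <= n: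
--                 symbol = operator_mappings.get(' '.join(input_terms_list[index:index + length]))
--                 if symbol:
--                     candidates.append((length, index, symbol))
--                     break
--     best = None
--     for cand in candidates:
--         if best is None or cand[0] > best[0]:
--             best = cand
--     if best is None:
--         return None, 0
--     return best[2], best[0]
-- ===== Notes on version B (the rewrite author's own statement) =====
-- stated objective: alternative
-- what changed: A iterates lengths 5..1 in the outer loop and returns at the first matching window; B makes a single left-to-right pass over start indices recording the longest operator phrase at each index, then selects the first candidate of maximal length with a fold.
import Mathlib
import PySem

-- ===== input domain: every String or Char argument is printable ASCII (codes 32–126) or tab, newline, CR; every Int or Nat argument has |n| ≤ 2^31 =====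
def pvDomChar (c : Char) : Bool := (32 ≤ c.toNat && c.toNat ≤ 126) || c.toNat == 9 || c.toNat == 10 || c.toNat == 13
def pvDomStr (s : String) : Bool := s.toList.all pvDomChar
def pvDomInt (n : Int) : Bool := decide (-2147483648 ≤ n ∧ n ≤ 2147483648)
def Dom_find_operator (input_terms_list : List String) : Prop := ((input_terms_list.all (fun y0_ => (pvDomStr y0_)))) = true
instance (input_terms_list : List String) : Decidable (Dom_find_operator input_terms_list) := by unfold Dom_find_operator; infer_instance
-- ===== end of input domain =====

-- B replaces A's length-outer early-return double loop by a single index-outer pass that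
-- records the longest match per index, followed by an argmax selection (alternative decomposition).

def operator_mappings : PySem.Dict String String := PySem.Dict.ofList
  [("=", "="), ("==", "="), (">", ">"), ("<", "<"), (">=", ">="), ("<=", "<="), ("!=", "!="),
   ("equal to", "="), ("equals", "="), ("greater than or equal to", ">="),
   ("less than or equal to", "<="), ("not equal to", "!="), ("not equals", "!="),
   ("greater than", ">"), ("less than", "<"), ("fewer than", "<"), ("more than", ">"),
   ("greater", ">"), ("exceeds", ">"), ("less", "<"), ("above", ">"), ("below", "<"), ("is", "=")]

-- ===== PORT A =====
-- outer loop: range(5, 0, -1) = [5,4,3,2,1]; inner loop: range(len - op_length + 1) with the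
-- early return rendered as findSome?; xs[i:i+L] for 0 ≤ i is (xs.drop i).take L (exact here:
-- both bounds are nonnegative); `if op_symbol:` is truthiness of the looked-up string.
def find_operator (input_terms_list : List String) : Option String × Int :=
  match [5, 4, 3, 2, 1].findSome? (fun op_length =>
      (List.range (input_terms_list.length + 1 - op_length)).findSome? (fun index =>
        match operator_mappings.get?
            (PySem.Str.join " " ((input_terms_list.drop index).take op_length)) with
        | some op_symbol =>
            if op_symbol = "" then none
            else some ((some op_symbol : Option String), (op_length : Int))
        | none => none)) with
  | some r => r
  | none => (none, 0)

-- ===== PORT B =====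
-- single pass over start indices collecting (length, index, symbol) of the longest match at
-- each index (break = findSome? over [5,4,3,2,1]), then a fold selecting the first candidate
-- of maximal length.
def find_operator_alt (input_terms_list : List String) : Option String × Int :=
  let n := input_terms_list.length
  let candidates : List (Nat × Nat × String) :=
    (List.range n).filterMap (fun index =>
      [5, 4, 3, 2, 1].findSome? (fun length =>
        if index + length ≤ n then
          match operator_mappings.get?
              (PySem.Str.join " " ((input_terms_list.drop index).take length)) with
          | some symbol => if symbol = "" then none else some (length, index, symbol)
          | none => none
        else none))
  let best := candidates.foldl (fun best cand =>
      match best with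
      | none => some cand
      | some b => if b.1 < cand.1 then some cand else some b)
    (none : Option (Nat × Nat × String))
  match best with
  | none => (none, 0)
  | some b => (some b.2.2, (b.1 : Int))

-- ===== PRECONDITION & SPEC =====
def Spec_find_operator (input_terms_list : List String) (out : Option String × Int) : Prop := out = find_operator_alt input_terms_list
instance (input_terms_list : List String) (out : Option String × Int) : Decidable (Spec_find_operator input_terms_list out) := by unfold Spec_find_operator; infer_instance

-- ===== CLAIM (what is proved, stated in full; the proofs are below) =====
def Claim_equal_find_operator : Prop := ∀ (input_terms_list : List String), Dom_find_operator input_terms_list → Spec_find_operator input_terms_list (find_operator input_terms_list)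

-- ===== LEMMAS AND PROOFS =====

-- the per-(index, length) lookup both ports perform, abstracted
def hitSym (xs : List String) (i L : Nat) : Option String :=
  match operator_mappings.get? (PySem.Str.join " " ((xs.drop i).take L)) with
  | some s => if s = "" then none else some s
  | none => none

-- generalized shapes of the two ports over an arbitrary hit function
def runA (h : Nat → Nat → Option String) (n : Nat) : Option String × Int :=
  match [5, 4, 3, 2, 1].findSome? (fun L =>
      (List.range (n + 1 - L)).findSome? (fun i =>
        (h i L).map (fun s => ((some s : Option String), (L : Int))))) with
  | some r => r
  | none => (none, 0)

def candAt (h : Nat → Nat → Option String) (n i L : Nat) : Option (Nat × Nat × String) :=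
  if i + L ≤ n then (h i L).map (fun s => (L, i, s)) else none

def cand (h : Nat → Nat → Option String) (n i : Nat) : Option (Nat × Nat × String) :=
  [5, 4, 3, 2, 1].findSome? (candAt h n i)

def pick (b : Option (Nat × Nat × String)) (c : Nat × Nat × String) : Option (Nat × Nat × String) :=
  match b with
  | none => some c
  | some b => if b.1 < c.1 then some c else some b

def runB (h : Nat → Nat → Option String) (n : Nat) : Option String × Int :=
  match ((List.range n).filterMap (cand h n)).foldl pick none with
  | none => (none, 0)
  | some b => (some b.2.2, (b.1 : Int))


theorem findSome?_congr_pv {α β : Type} (f g : α → Option β) (l : List α)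
    (h : ∀ x ∈ l, f x = g x) : l.findSome? f = l.findSome? g := by
  induction l with
  | nil => rfl
  | cons a t ih =>
    simp only [List.findSome?_cons, h a (by simp)]
    cases g a with
    | none => exact ih (fun x hx => h x (by simp [hx]))
    | some b => rfl

theorem findSome?_range_first {β : Type} (f : Nat → Option β) (n i : Nat) (b : β)
    (hi : i < n) (hf : f i = some b) (hmin : ∀ j, j < i → f j = none) :
    (List.range n).findSome? f = some b := by
  induction i generalizing f n with
  | zero =>
    obtain ⟨m, rfl⟩ : ∃ m, n = m + 1 := ⟨n - 1, by omega⟩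
    rw [List.range_succ_eq_map, List.findSome?_cons, hf]
  | succ k ih =>
    obtain ⟨m, rfl⟩ : ∃ m, n = m + 1 := ⟨n - 1, by omega⟩
    rw [List.range_succ_eq_map, List.findSome?_cons, hmin 0 (Nat.succ_pos k),
      List.findSome?_map]
    exact ih _ m (Nat.lt_of_succ_lt_succ hi) hf (fun j hj => hmin (j+1) (Nat.succ_lt_succ hj))

theorem foldl_pick_cases (l : List (Nat × Nat × String)) (acc : Option (Nat × Nat × String)) :
    l.foldl pick acc = acc ∨ ∃ b ∈ l, l.foldl pick acc = some b := by
  induction l generalizing acc with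
  | nil => exact Or.inl rfl
  | cons x t ih =>
    rw [List.foldl_cons]
    rcases ih (pick acc x) with h | ⟨b, hb, h⟩
    · rw [h]
      cases acc with
      | none => exact Or.inr ⟨x, by simp, rfl⟩
      | some a =>
        by_cases hlt : a.1 < x.1
        · exact Or.inr ⟨x, by simp, by simp [pick, hlt]⟩
        · exact Or.inl (by simp [pick, hlt])
    · exact Or.inr ⟨b, by simp [hb], h⟩

theorem foldl_pick_max (l : List (Nat × Nat × String)) (c : Nat × Nat × String)
    (h : ∀ x ∈ l, x.1 ≤ c.1) : l.foldl pick (some c) = some c := by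
  induction l with
  | nil => rfl
  | cons x t ih =>
    rw [List.foldl_cons]
    have : ¬ c.1 < x.1 := Nat.not_lt.mpr (h x (by simp))
    simp only [pick, this, if_false]
    exact ih (fun x hx => h x (by simp [hx]))

theorem foldl_pick_best (pre post : List (Nat × Nat × String)) (c : Nat × Nat × String)
    (hpre : ∀ x ∈ pre, x.1 < c.1) (hpost : ∀ x ∈ post, x.1 ≤ c.1) :
    (pre ++ c :: post).foldl pick none = some c := by
  rw [List.foldl_append, List.foldl_cons]
  rcases foldl_pick_cases pre none with h | ⟨b, hb, h⟩
  · rw [h]; exact foldl_pick_max post c hpost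
  · rw [h]
    simp only [pick, hpre b hb, if_true]
    exact foldl_pick_max post c hpost

-- candidate produced at some index i: its length is one of 1..5, with a real hit
theorem cand_some_spec (h : Nat → Nat → Option String) (n i : Nat) (c : Nat × Nat × String)
    (hc : cand h n i = some c) :
    c.2.1 = i ∧ 1 ≤ c.1 ∧ c.1 ≤ 5 ∧ i + c.1 ≤ n ∧ h i c.1 = some c.2.2 := by
  obtain ⟨L, hL, hAt⟩ := List.exists_of_findSome?_eq_some hc
  unfold candAt at hAt
  by_cases hle : i + L ≤ n
  · rw [if_pos hle] at hAt
    cases hs : h i L with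
    | none => rw [hs] at hAt; simp at hAt
    | some s =>
      rw [hs] at hAt
      simp only [Option.map_some, Option.some.injEq] at hAt
      subst hAt
      refine ⟨rfl, ?_, ?_, hle, hs⟩ <;> (fin_cases hL <;> omega)
  · rw [if_neg hle] at hAt; simp at hAt

theorem findSome?_five {α : Type} (g : Nat → Option α) (Ls : Nat) (h1 : 1 ≤ Ls) (h5 : Ls ≤ 5)
    (v : α) (hLs : g Ls = some v) (hnone : ∀ L, Ls < L → L ≤ 5 → g L = none) :
    [5, 4, 3, 2, 1].findSome? g = some v := by
  have n5 : Ls < 5 → g 5 = none := fun h => hnone 5 h (by omega)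
  have n4 : Ls < 4 → g 4 = none := fun h => hnone 4 h (by omega)
  have n3 : Ls < 3 → g 3 = none := fun h => hnone 3 h (by omega)
  have n2 : Ls < 2 → g 2 = none := fun h => hnone 2 h (by omega)
  interval_cases Ls
  · simp only [List.findSome?_cons, n5 (by omega), n4 (by omega), n3 (by omega), n2 (by omega), hLs]
  · simp only [List.findSome?_cons, n5 (by omega), n4 (by omega), n3 (by omega), hLs]
  · simp only [List.findSome?_cons, n5 (by omega), n4 (by omega), hLs]
  · simp only [List.findSome?_cons, n5 (by omega), hLs]
  · simp only [List.findSome?_cons, hLs]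

theorem findSome?_five_none {α : Type} (g : Nat → Option α)
    (hnone : ∀ L, 1 ≤ L → L ≤ 5 → g L = none) : [5, 4, 3, 2, 1].findSome? g = none := by
  rw [List.findSome?_eq_none_iff]
  intro L hL
  fin_cases hL <;> exact hnone _ (by omega) (by omega)

theorem master_some (h : Nat → Nat → Option String) (n Ls : Nat) (h1 : 1 ≤ Ls) (h5 : Ls ≤ 5)
    (hEx : ∃ i, i < n + 1 - Ls ∧ (h i Ls).isSome = true)
    (hmax : ∀ L, Ls < L → L ≤ 5 → ∀ i, i + L ≤ n → h i L = none) :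
    runA h n = runB h n := by
  classical
  let i0 := Nat.find hEx
  have hP : i0 < n + 1 - Ls ∧ (h i0 Ls).isSome = true := Nat.find_spec hEx
  have hmin : ∀ j, j < i0 → h j Ls = none := by
    intro j hj
    have hnp := Nat.find_min hEx hj
    have hjlt : j < n + 1 - Ls := by omega
    by_contra hne
    exact hnp ⟨hjlt, Option.isSome_iff_ne_none.mpr hne⟩
  obtain ⟨s, hs⟩ := Option.isSome_iff_exists.mp hP.2
  have hiLs : i0 + Ls ≤ n := by omega
  -- A side
  have hInnerNone : ∀ L, Ls < L → L ≤ 5 →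
      (List.range (n + 1 - L)).findSome?
        (fun i => (h i L).map (fun s => ((some s : Option String), (L : Int)))) = none := by
    intro L hL1 hL2
    rw [List.findSome?_eq_none_iff]
    intro i hi
    rw [hmax L hL1 hL2 i (by rw [List.mem_range] at hi; omega)]
    rfl
  have hInnerLs : (List.range (n + 1 - Ls)).findSome?
      (fun i => (h i Ls).map (fun s => ((some s : Option String), (Ls : Int)))) =
      some ((some s : Option String), (Ls : Int)) := by
    refine findSome?_range_first _ _ i0 _ hP.1 (by rw [hs]; rfl) (fun j hj => by rw [hmin j hj]; rfl)
  have hA : runA h n = (some s, (Ls : Int)) := by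
    unfold runA
    rw [findSome?_five _ Ls h1 h5 _ hInnerLs hInnerNone]
  -- B side
  have hcand_i : cand h n i0 = some (Ls, i0, s) := by
    refine findSome?_five _ Ls h1 h5 _ ?_ ?_
    · unfold candAt; rw [if_pos hiLs, hs]; rfl
    · intro L hL1 hL2
      unfold candAt
      by_cases hle : i0 + L ≤ n
      · rw [if_pos hle, hmax L hL1 hL2 i0 hle]; rfl
      · rw [if_neg hle]
  have hle_cands : ∀ i c, cand h n i = some c → c.1 ≤ Ls := by
    intro i c hc
    obtain ⟨-, hc1, hc5, hle, hhit⟩ := cand_some_spec h n i c hc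
    by_contra hgt
    rw [hmax c.1 (by omega) hc5 i hle] at hhit
    exact Option.some_ne_none _ hhit.symm
  have hlt_pre : ∀ i, i < i0 → ∀ c, cand h n i = some c → c.1 < Ls := by
    intro i hi c hc
    have hle := hle_cands i c hc
    rcases Nat.lt_or_ge c.1 Ls with hlt | hge
    · exact hlt
    · exfalso
      have hEq : c.1 = Ls := by omega
      obtain ⟨-, -, -, hlen, hhit⟩ := cand_some_spec h n i c hc
      rw [hEq] at hlen hhit
      rw [hmin i hi] at hhit
      exact Option.some_ne_none _ hhit.symm
  have hi_n : i0 < n := by omega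
  have hsplit : List.range n = List.range i0 ++ i0 :: List.range' (i0 + 1) (n - i0 - 1) := by
    have h2 : List.range' i0 (n - i0) = i0 :: List.range' (i0 + 1) (n - i0 - 1) := by
      conv_lhs => rw [show n - i0 = (n - i0 - 1) + 1 by omega]
      rw [List.range'_succ]
    rw [← h2, List.range_eq_range', List.range_eq_range']
    have h3 := List.range'_append_1 (s := 0) (m := i0) (n := n - i0)
    simp only [Nat.zero_add] at h3
    rw [h3, Nat.add_sub_cancel' (Nat.le_of_lt hi_n)]
  have hB : runB h n = (some s, (Ls : Int)) := by
    unfold runB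
    rw [hsplit, List.filterMap_append, List.filterMap_cons, hcand_i]
    have hfold : ((List.range i0).filterMap (cand h n) ++
        (Ls, i0, s) :: (List.range' (i0 + 1) (n - i0 - 1)).filterMap (cand h n)).foldl pick none
        = some (Ls, i0, s) := by
      apply foldl_pick_best
      · intro x hx
        obtain ⟨a, ha, hfa⟩ := List.mem_filterMap.mp hx
        rw [List.mem_range] at ha
        exact hlt_pre a ha x hfa
      · intro x hx
        obtain ⟨a, _, hfa⟩ := List.mem_filterMap.mp hx
        exact hle_cands a x hfa
    rw [hfold]
  rw [hA, hB]

theorem master_none (h : Nat → Nat → Option String) (n : Nat)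
    (hall : ∀ L, 1 ≤ L → L ≤ 5 → ∀ i, i + L ≤ n → h i L = none) :
    runA h n = runB h n := by
  have hA : runA h n = (none, 0) := by
    unfold runA
    rw [findSome?_five_none]
    intro L hL1 hL5
    rw [List.findSome?_eq_none_iff]
    intro i hi
    rw [hall L hL1 hL5 i (by rw [List.mem_range] at hi; omega)]
    rfl
  have hB : runB h n = (none, 0) := by
    unfold runB
    have hnil : (List.range n).filterMap (cand h n) = [] := by
      rw [List.filterMap_eq_nil_iff]
      intro i _
      apply findSome?_five_none
      intro L hL1 hL5
      unfold candAt
      by_cases hle : i + L ≤ n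
      · rw [if_pos hle, hall L hL1 hL5 i hle]; rfl
      · rw [if_neg hle]
    rw [hnil]
    rfl
  rw [hA, hB]

theorem main_eq (h : Nat → Nat → Option String) (n : Nat) : runA h n = runB h n := by
  have notH : ∀ L, ¬(∃ i, i < n + 1 - L ∧ (h i L).isSome = true) →
      ∀ i, i + L ≤ n → h i L = none := by
    intro L hn i hle
    by_contra hne
    exact hn ⟨i, by omega, Option.isSome_iff_ne_none.mpr hne⟩
  by_cases c5 : ∃ i, i < n + 1 - 5 ∧ (h i 5).isSome = true
  · exact master_some h n 5 (by omega) (by omega) c5 (fun L hgt hle => by omega)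
  by_cases c4 : ∃ i, i < n + 1 - 4 ∧ (h i 4).isSome = true
  · refine master_some h n 4 (by omega) (by omega) c4 (fun L hgt hle i hi => ?_)
    have : L = 5 := by omega
    subst this; exact notH 5 c5 i hi
  by_cases c3 : ∃ i, i < n + 1 - 3 ∧ (h i 3).isSome = true
  · refine master_some h n 3 (by omega) (by omega) c3 (fun L hgt hle i hi => ?_)
    rcases (by omega : L = 4 ∨ L = 5) with rfl | rfl
    · exact notH 4 c4 i hi
    · exact notH 5 c5 i hi
  by_cases c2 : ∃ i, i < n + 1 - 2 ∧ (h i 2).isSome = true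
  · refine master_some h n 2 (by omega) (by omega) c2 (fun L hgt hle i hi => ?_)
    rcases (by omega : L = 3 ∨ L = 4 ∨ L = 5) with rfl | rfl | rfl
    · exact notH 3 c3 i hi
    · exact notH 4 c4 i hi
    · exact notH 5 c5 i hi
  by_cases c1 : ∃ i, i < n + 1 - 1 ∧ (h i 1).isSome = true
  · refine master_some h n 1 (by omega) (by omega) c1 (fun L hgt hle i hi => ?_)
    rcases (by omega : L = 2 ∨ L = 3 ∨ L = 4 ∨ L = 5) with rfl | rfl | rfl | rfl
    · exact notH 2 c2 i hi
    · exact notH 3 c3 i hi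
    · exact notH 4 c4 i hi
    · exact notH 5 c5 i hi
  · refine master_none h n (fun L hL1 hL5 i hi => ?_)
    rcases (by omega : L = 1 ∨ L = 2 ∨ L = 3 ∨ L = 4 ∨ L = 5) with rfl | rfl | rfl | rfl | rfl
    · exact notH 1 c1 i hi
    · exact notH 2 c2 i hi
    · exact notH 3 c3 i hi
    · exact notH 4 c4 i hi
    · exact notH 5 c5 i hi

theorem runA_eq (xs : List String) : find_operator xs = runA (hitSym xs) xs.length := by
  unfold find_operator runA
  have houter :
      [5, 4, 3, 2, 1].findSome? (fun op_length =>
        (List.range (xs.length + 1 - op_length)).findSome? (fun index =>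
          match operator_mappings.get?
              (PySem.Str.join " " ((xs.drop index).take op_length)) with
          | some op_symbol =>
              if op_symbol = "" then none
              else some ((some op_symbol : Option String), (op_length : Int))
          | none => none)) =
      [5, 4, 3, 2, 1].findSome? (fun L =>
        (List.range (xs.length + 1 - L)).findSome? (fun i =>
          (hitSym xs i L).map (fun s => ((some s : Option String), (L : Int))))) := by
    apply findSome?_congr_pv
    intro L _
    apply findSome?_congr_pv
    intro i _
    unfold hitSym
    cases operator_mappings.get? (PySem.Str.join " " ((xs.drop i).take L)) with
    | none => rfl
    | some s => by_cases hs : s = "" <;> simp [hs]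
  rw [houter]

theorem runB_eq (xs : List String) : find_operator_alt xs = runB (hitSym xs) xs.length := by
  have hlist : (List.range xs.length).filterMap (fun index =>
      [5, 4, 3, 2, 1].findSome? (fun length =>
        if index + length ≤ xs.length then
          match operator_mappings.get?
              (PySem.Str.join " " ((xs.drop index).take length)) with
          | some symbol => if symbol = "" then none else some (length, index, symbol)
          | none => none
        else none)) =
      (List.range xs.length).filterMap (cand (hitSym xs) xs.length) := by
    apply List.filterMap_congr
    intro i _
    apply findSome?_congr_pv
    intro L _
    unfold candAt hitSym
    by_cases hle : i + L ≤ xs.length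
    · rw [if_pos hle, if_pos hle]
      cases operator_mappings.get? (PySem.Str.join " " ((xs.drop i).take L)) with
      | none => rfl
      | some s => by_cases hs : s = "" <;> simp [hs]
    · rw [if_neg hle, if_neg hle]
  show (match ((List.range xs.length).filterMap (fun index =>
      [5, 4, 3, 2, 1].findSome? (fun length =>
        if index + length ≤ xs.length then
          match operator_mappings.get?
              (PySem.Str.join " " ((xs.drop index).take length)) with
          | some symbol => if symbol = "" then none else some (length, index, symbol)
          | none => none
        else none))).foldl pick none with
    | none => ((none : Option String), (0 : Int))
    | some b => (some b.2.2, (b.1 : Int))) = runB (hitSym xs) xs.length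
  rw [hlist]
  rfl


-- ===== VERDICT (by name: the statement is the Claim_ definition above) =====
theorem find_operator_spec : Claim_equal_find_operator := by
  intro xs _
  show find_operator xs = find_operator_alt xs
  rw [runA_eq, runB_eq, main_eq]
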